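-- pv_equiv track=rewrite | github.com/MrBrantCode/unitest_baseline | mut_generate/mist_train_cf/cf_72364/solution.py | array_interval
-- ===== SOURCE A (Python) =====
-- def array_interval(arr):
--     max_val = float('-inf')
--     min_val = float('inf')
--     max_pos = []
--     min_pos = []
--
--     for i in range(len(arr)):
--         for j in range(len(arr[i])):
--             if arr[i][j] > max_val:
--                 max_val = arr[i][j]
--                 max_pos = [i, j]
--             if arr[i][j] < min_val:
--                 min_val = arr[i][j]
--                 min_pos = [i, j]
--
--     interval = max_val - min_val
--     return interval, max_pos, min_pos
-- ===== SOURCE B (Python) =====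
-- def array_interval(arr):
--     flat = [(v, i, j) for i, row in enumerate(arr) for j, v in enumerate(row)]
--     mx = max(flat, key=lambda t: t[0])
--     mn = min(flat, key=lambda t: t[0])
--     return mx[0] - mn[0], [mx[1], mx[2]], [mn[1], mn[2]]
-- ===== Notes on version B (the rewrite author's own statement) =====
-- stated objective: idiomatic
-- what changed: Replaces the hand-rolled nested index loops with running max/min state by flattening to (value,i,j) triples once and using the builtin max/min with a key (both keep the first extremal element, matching A's strict comparisons).
-- outside the precondition, e.g. on array_interval([]): A returns (-inf, [], []), B raises ValueError; on array_interval([[], []]): A returns (-inf, [], []), B raises ValueError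
import Mathlib
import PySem

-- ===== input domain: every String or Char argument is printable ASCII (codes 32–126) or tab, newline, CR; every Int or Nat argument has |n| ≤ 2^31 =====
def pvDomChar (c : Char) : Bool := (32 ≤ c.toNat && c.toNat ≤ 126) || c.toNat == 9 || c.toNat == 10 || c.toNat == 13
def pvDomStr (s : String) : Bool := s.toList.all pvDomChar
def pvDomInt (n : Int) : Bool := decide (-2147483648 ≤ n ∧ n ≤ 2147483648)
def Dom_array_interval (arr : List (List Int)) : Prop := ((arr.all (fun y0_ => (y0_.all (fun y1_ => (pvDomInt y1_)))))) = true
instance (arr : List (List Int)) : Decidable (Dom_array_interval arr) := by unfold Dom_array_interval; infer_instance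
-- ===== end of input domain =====

-- B replaces the hand-rolled nested index loops by a flat (value,i,j) list and the builtin first-extremal max/min (more idiomatic, same cost).

-- ===== PORT A =====
-- A's max_val/min_val start at float('-inf')/float('inf'): represented as `none`
-- (exact: every int is > -inf and < +inf, so `none` compares as the Python infinities do).
-- State is ((max_val, max_pos), (min_val, min_pos)).
def aGt (x : Int) (mv : Option Int) : Bool := match mv with | none => true | some v => v < x
def aLt (x : Int) (mv : Option Int) : Bool := match mv with | none => true | some v => x < v

def aStep (i j : Int) (x : Int) (st : (Option Int × List Int) × (Option Int × List Int)) :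
    (Option Int × List Int) × (Option Int × List Int) :=
  let st1 := if aGt x st.1.1 then ((some x, [i, j]), st.2) else st
  if aLt x st1.2.1 then (st1.1, (some x, [i, j])) else st1

def array_interval (arr : List (List Int)) : Int × List Int × List Int :=
  let st := (PySem.List.pyRange 0 (PySem.List.len arr)).foldl (fun st i =>
      (PySem.List.pyRange 0 (PySem.List.len (PySem.List.pyGetD arr i []))).foldl (fun st j =>
          aStep i j (PySem.List.pyGetD (PySem.List.pyGetD arr i []) j 0) st) st)
    ((none, []), (none, []))
  -- max_val - min_val; outside Pre_ (no element) Python's value is the float -inf, not an Int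
  (st.1.1.getD 0 - st.2.1.getD 0, st.1.2, st.2.2)

-- ===== PORT B =====
def array_interval_alt (arr : List (List Int)) : Int × List Int × List Int :=
  let flat := (PySem.List.enumerate arr).flatMap
      (fun p => (PySem.List.enumerate p.2).map (fun q => (q.2, p.1, q.1)))
  match PySem.List.max? flat (fun t => t.1), PySem.List.min? flat (fun t => t.1) with
  | some mx, some mn => (mx.1 - mn.1, [mx.2.1, mx.2.2], [mn.2.1, mn.2.2])
  | _, _ => (0, [], [])   -- unreachable under Pre_: Python B raises ValueError on an empty flat list

-- ===== PRECONDITION & SPEC =====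
-- Pre_ excludes arrays with no element at all (empty, or all rows empty): there A returns
-- the float -inf (not an Int value) and B raises ValueError.
def Pre_array_interval (arr : List (List Int)) : Prop := (arr.any (fun r => !r.isEmpty)) = true
instance (arr : List (List Int)) : Decidable (Pre_array_interval arr) := by unfold Pre_array_interval; infer_instance
def pvWitness_array_interval : List (List Int) := [[3, 1], [], [2, 7]]

def Spec_array_interval (arr : List (List Int)) (out : Int × List Int × List Int) : Prop := out = array_interval_alt arr
instance (arr : List (List Int)) (out : Int × List Int × List Int) : Decidable (Spec_array_interval arr out) := by unfold Spec_array_interval; infer_instance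

-- ===== CLAIM (what is proved, stated in full; the proofs are below) =====
def Claim_equal_array_interval : Prop := ∀ (arr : List (List Int)), Dom_array_interval arr → Pre_array_interval arr → Spec_array_interval arr (array_interval arr)

-- ===== LEMMAS AND PROOFS =====

-- the flat list B builds
def pvFlat (arr : List (List Int)) : List (Int × Int × Int) :=
  (PySem.List.enumerate arr).flatMap
    (fun p => (PySem.List.enumerate p.2).map (fun q => (q.2, p.1, q.1)))

-- the two independent halves of A's step
def maxStep (st : Option Int × List Int) (t : Int × Int × Int) : Option Int × List Int :=
  if aGt t.1 st.1 then (some t.1, [t.2.1, t.2.2]) else st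
def minStep (st : Option Int × List Int) (t : Int × Int × Int) : Option Int × List Int :=
  if aLt t.1 st.1 then (some t.1, [t.2.1, t.2.2]) else st

lemma aStep_prod (i j x : Int) (st : (Option Int × List Int) × (Option Int × List Int)) :
    aStep i j x st = (maxStep st.1 (x, i, j), minStep st.2 (x, i, j)) := by
  unfold aStep maxStep minStep
  by_cases h1 : aGt x st.1.1 <;> by_cases h2 : aLt x st.2.1 <;> simp [h1, h2]

lemma foldl_prod {α σ τ : Type} (f : σ → α → σ) (g : τ → α → τ) (l : List α) (a : σ) (b : τ) :
    l.foldl (fun st x => (f st.1 x, g st.2 x)) (a, b) = (l.foldl f a, l.foldl g b) := by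
  induction l generalizing a b with
  | nil => rfl
  | cons h t ih => simpa using ih (f a h) (g b h)

-- encoding of a max?/min? accumulator as A's (value, pos) state
def enc (acc : Option (Int × Int × Int)) : Option Int × List Int :=
  match acc with
  | none => (none, [])
  | some m => (some m.1, [m.2.1, m.2.2])

lemma maxStep_enc (acc : Option (Int × Int × Int)) (t : Int × Int × Int) :
    maxStep (enc acc) t =
      enc (match acc with
           | none => some t
           | some m => if m.1 < t.1 then some t else some m) := by
  cases acc with
  | none => simp [maxStep, enc, aGt]
  | some m =>
    by_cases h : m.1 < t.1 <;> simp [maxStep, enc, aGt, h]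

lemma minStep_enc (acc : Option (Int × Int × Int)) (t : Int × Int × Int) :
    minStep (enc acc) t =
      enc (match acc with
           | none => some t
           | some m => if t.1 < m.1 then some t else some m) := by
  cases acc with
  | none => simp [minStep, enc, aLt]
  | some m =>
    by_cases h : t.1 < m.1 <;> simp [minStep, enc, aLt, h]

def mStepMax (acc : Option (Int × Int × Int)) (x : Int × Int × Int) : Option (Int × Int × Int) :=
  match acc with | none => some x | some m => if m.1 < x.1 then some x else some m
def mStepMin (acc : Option (Int × Int × Int)) (x : Int × Int × Int) : Option (Int × Int × Int) :=
  match acc with | none => some x | some m => if x.1 < m.1 then some x else some m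

lemma foldl_maxStep_enc (l : List (Int × Int × Int)) (acc : Option (Int × Int × Int)) :
    l.foldl maxStep (enc acc) = enc (l.foldl mStepMax acc) := by
  induction l generalizing acc with
  | nil => rfl
  | cons h t ih =>
    simp only [List.foldl_cons, maxStep_enc]
    rw [show (match acc with
             | none => some h
             | some m => if m.1 < h.1 then some h else some m) = mStepMax acc h from by
      cases acc <;> rfl]
    exact ih _

lemma foldl_minStep_enc (l : List (Int × Int × Int)) (acc : Option (Int × Int × Int)) :
    l.foldl minStep (enc acc) = enc (l.foldl mStepMin acc) := by
  induction l generalizing acc with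
  | nil => rfl
  | cons h t ih =>
    simp only [List.foldl_cons, minStep_enc]
    rw [show (match acc with
             | none => some h
             | some m => if h.1 < m.1 then some h else some m) = mStepMin acc h from by
      cases acc <;> rfl]
    exact ih _

lemma max?_enc (l : List (Int × Int × Int)) :
    l.foldl maxStep (none, []) = enc (PySem.List.max? l (fun t => t.1)) := by
  have hfn : PySem.List.max? l (fun t => t.1) = l.foldl mStepMax none := by
    unfold PySem.List.max?
    congr 1
    funext acc x
    cases acc <;> rfl
  rw [hfn]
  have h := foldl_maxStep_enc l none
  rw [show enc none = ((none, []) : Option Int × List Int) from rfl] at h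
  exact h

lemma min?_enc (l : List (Int × Int × Int)) :
    l.foldl minStep (none, []) = enc (PySem.List.min? l (fun t => t.1)) := by
  have hfn : PySem.List.min? l (fun t => t.1) = l.foldl mStepMin none := by
    unfold PySem.List.min?
    congr 1
    funext acc x
    cases acc <;> rfl
  rw [hfn]
  have h := foldl_minStep_enc l none
  rw [show enc none = ((none, []) : Option Int × List Int) from rfl] at h
  exact h

-- A's nested index loops, re-expressed as one fold over B's flat list
lemma A_eq_flat (arr : List (List Int)) :
    array_interval arr =
      (let st := (pvFlat arr).foldl (fun st t => aStep t.2.1 t.2.2 t.1 st) ((none, []), (none, []))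
       (st.1.1.getD 0 - st.2.1.getD 0, st.1.2, st.2.2)) := by
  unfold array_interval pvFlat
  rw [PySem.List.enumerate_eq_map_pyRange arr [], List.flatMap_map, List.foldl_flatMap]
  have hfun : (fun (st : (Option Int × List Int) × (Option Int × List Int)) (i : Int) =>
      (PySem.List.pyRange 0 (PySem.List.len (PySem.List.pyGetD arr i []))).foldl (fun st j =>
          aStep i j (PySem.List.pyGetD (PySem.List.pyGetD arr i []) j 0) st) st)
    = (fun (acc : (Option Int × List Int) × (Option Int × List Int)) (x : Int) =>
        List.foldl (fun st t => aStep t.2.1 t.2.2 t.1 st) acc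
          (List.map (fun q => (q.2, (x, PySem.List.pyGetD arr x []).1, q.1))
            (PySem.List.enumerate (x, PySem.List.pyGetD arr x []).2))) := by
    funext st i
    simp only
    rw [PySem.List.enumerate_eq_map_pyRange (PySem.List.pyGetD arr i []) 0, List.map_map,
      List.foldl_map]
    simp [Function.comp]
  rw [hfun]

lemma flat_ne_nil (arr : List (List Int)) (h : Pre_array_interval arr) : pvFlat arr ≠ [] := by
  unfold Pre_array_interval at h
  simp only [List.any_eq_true, Bool.not_eq_true'] at h
  obtain ⟨r, hr, hne⟩ := h
  obtain ⟨k, hk, rfl⟩ := List.mem_iff_getElem.mp hr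
  intro hnil
  unfold pvFlat at hnil
  rw [List.flatMap_eq_nil_iff] at hnil
  have hmem : ((k : Int), arr[k]) ∈ PySem.List.enumerate arr := by
    rw [PySem.List.mem_enumerate_iff]
    exact ⟨k, hk, by simp⟩
  have := hnil _ hmem
  simp only [List.map_eq_nil_iff] at this
  cases he : arr[k] with
  | nil => exact absurd he (by simpa using hne)
  | cons a t =>
    rw [he] at this
    rw [PySem.List.enumerate_cons] at this
    exact List.cons_ne_nil _ _ this

-- ===== VERDICT (by name: the statement is the Claim_ definition above) =====
theorem array_interval_spec : Claim_equal_array_interval := by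
  intro arr _ hpre
  unfold Spec_array_interval array_interval_alt
  rw [A_eq_flat]
  have hfold : (pvFlat arr).foldl (fun st t => aStep t.2.1 t.2.2 t.1 st) ((none, []), (none, []))
      = (enc (PySem.List.max? (pvFlat arr) (fun t => t.1)),
         enc (PySem.List.min? (pvFlat arr) (fun t => t.1))) := by
    have hstep : (fun (st : (Option Int × List Int) × (Option Int × List Int)) (t : Int × Int × Int) =>
        aStep t.2.1 t.2.2 t.1 st) = fun st t => (maxStep st.1 t, minStep st.2 t) := by
      funext st t
      rw [aStep_prod]
    rw [hstep, foldl_prod, max?_enc, min?_enc]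
  have hne := flat_ne_nil arr hpre
  obtain ⟨mx, hmx⟩ : ∃ m, PySem.List.max? (pvFlat arr) (fun t => t.1) = some m := by
    cases h : PySem.List.max? (pvFlat arr) (fun t => t.1) with
    | none => exact absurd ((PySem.List.max?_eq_none_iff _ _).mp h) hne
    | some m => exact ⟨m, rfl⟩
  obtain ⟨mn, hmn⟩ : ∃ m, PySem.List.min? (pvFlat arr) (fun t => t.1) = some m := by
    cases h : PySem.List.min? (pvFlat arr) (fun t => t.1) with
    | none => exact absurd ((PySem.List.min?_eq_none_iff _ _).mp h) hne
    | some m => exact ⟨m, rfl⟩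
  show _ = (let flat := pvFlat arr; _)
  simp only [pvFlat] at *
  rw [hfold, hmx, hmn]
  simp [enc]
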